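-- pv_equiv track=rewrite | github.com/hlabs-dev/aoc | 2024/20.py | diagidx
-- ===== SOURCE A (Python) =====
-- from collections import deque,defaultdict
--
-- def diagidx(pathl):
--     idxp,idxm = defaultdict(list), defaultdict(list)
--     for i,pos in enumerate(pathl):
--         idxp[sum(pos)].append((*pos,i))
--         idxm[pos[0]-pos[1]].append((*pos,i))
--     for i in idxp:
--         idxp[i].sort()
--     for i in idxm: idxm[i].sort()
--     return idxp,idxm
-- ===== SOURCE B (Python) =====
-- from collections import defaultdict
--
-- def _insort(lst, item):
--     # return a new list: lst (already sorted) with item inserted in order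
--     # (after any equal elements, as an insertion sort does)
--     for j in range(len(lst)):
--         if item < lst[j]:
--             return lst[:j] + [item] + lst[j:]
--     return lst + [item]
--
-- def diagidx(pathl):
--     # one pass: keep every bucket sorted while it is built, so no trailing
--     # sort loops are needed
--     idxp, idxm = defaultdict(list), defaultdict(list)
--     for i, (x, y) in enumerate(pathl):
--         idxp[x + y] = _insort(idxp[x + y], (x, y, i))
--         idxm[x - y] = _insort(idxm[x - y], (x, y, i))
--     return idxp, idxm
-- ===== Notes on version B (the rewrite author's own statement) =====
-- stated objective: alternative
-- what changed: B keeps each diagonal bucket sorted as it is built, inserting every (x, y, i) triple in order with a hand-written ordered insert during the single enumerate pass, so A's two trailing per-bucket sort loops are eliminated entirely.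
import Mathlib
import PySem

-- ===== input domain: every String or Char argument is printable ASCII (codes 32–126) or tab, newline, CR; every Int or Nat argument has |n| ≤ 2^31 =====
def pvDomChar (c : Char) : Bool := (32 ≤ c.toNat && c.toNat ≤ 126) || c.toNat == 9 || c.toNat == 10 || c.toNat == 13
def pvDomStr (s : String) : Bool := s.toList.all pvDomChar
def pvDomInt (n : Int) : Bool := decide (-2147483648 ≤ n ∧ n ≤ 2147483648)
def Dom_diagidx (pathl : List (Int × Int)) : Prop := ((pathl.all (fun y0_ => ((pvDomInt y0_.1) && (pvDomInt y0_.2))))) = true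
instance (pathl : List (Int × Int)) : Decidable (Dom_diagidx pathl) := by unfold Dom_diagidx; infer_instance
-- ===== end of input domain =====

-- B keeps every bucket sorted while it is built (hand-written ordered insert),
-- so A's two trailing per-bucket sort loops disappear; alternative decomposition, not claimed faster.

-- ===== PORT A =====
-- shared helper: Python's `<` on int triples (the tuples being sorted) is the lexicographic order
def tkey (t : Int × Int × Int) : Lex (Int × Lex (Int × Int)) := toLex (t.1, toLex (t.2.1, t.2.2))

def diagidx (pathl : List (Int × Int)) : (List (Int × List (Int × Int × Int))) × (List (Int × List (Int × Int × Int))) :=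
  -- for i,pos in enumerate(pathl): idxp[sum(pos)].append((*pos,i)); idxm[pos[0]-pos[1]].append((*pos,i))
  let st := (PySem.List.enumerate pathl 0).foldl
    (fun (st : PySem.Dict Int (List (Int × Int × Int)) × PySem.Dict Int (List (Int × Int × Int))) p =>
      (st.1.modify (p.2.1 + p.2.2) [] (fun v => v ++ [(p.2.1, p.2.2, p.1)]),
       st.2.modify (p.2.1 - p.2.2) [] (fun v => v ++ [(p.2.1, p.2.2, p.1)])))
    (PySem.Dict.empty, PySem.Dict.empty)
  -- for i in idxp: idxp[i].sort()
  let idxp := st.1.keys.foldl (fun d k => d.modify k [] (fun v => PySem.List.sorted v tkey)) st.1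
  -- for i in idxm: idxm[i].sort()
  let idxm := st.2.keys.foldl (fun d k => d.modify k [] (fun v => PySem.List.sorted v tkey)) st.2
  (idxp.items, idxm.items)

-- ===== PORT B =====
-- _insort: linear scan, insert before the first strictly larger element (after equals)
def insortTrip (lst : List (Int × Int × Int)) (item : Int × Int × Int) : List (Int × Int × Int) :=
  match lst with
  | [] => [item]
  | h :: r => if tkey item < tkey h then item :: h :: r else h :: insortTrip r item

def diagidx_alt (pathl : List (Int × Int)) : (List (Int × List (Int × Int × Int))) × (List (Int × List (Int × Int × Int))) :=
  -- for i,(x,y) in enumerate(pathl): idxp[x+y] = _insort(idxp[x+y],(x,y,i)); idxm[x-y] = _insort(idxm[x-y],(x,y,i))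
  let st := (PySem.List.enumerate pathl 0).foldl
    (fun (st : PySem.Dict Int (List (Int × Int × Int)) × PySem.Dict Int (List (Int × Int × Int))) p =>
      (st.1.modify (p.2.1 + p.2.2) [] (fun v => insortTrip v (p.2.1, p.2.2, p.1)),
       st.2.modify (p.2.1 - p.2.2) [] (fun v => insortTrip v (p.2.1, p.2.2, p.1))))
    (PySem.Dict.empty, PySem.Dict.empty)
  (st.1.items, st.2.items)

-- ===== PRECONDITION & SPEC =====
def Spec_diagidx (pathl : List (Int × Int)) (out : (List (Int × List (Int × Int × Int))) × (List (Int × List (Int × Int × Int)))) : Prop := out = diagidx_alt pathl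
instance (pathl : List (Int × Int)) (out : (List (Int × List (Int × Int × Int))) × (List (Int × List (Int × Int × Int)))) : Decidable (Spec_diagidx pathl out) := by
  unfold Spec_diagidx
  exact @instDecidableEqProd _ _ (fun x y => inferInstance) (fun x y => inferInstance) _ _

-- ===== CLAIM (what is proved, stated in full; the proofs are below) =====
def Claim_equal_diagidx : Prop := ∀ (pathl : List (Int × Int)), Dom_diagidx pathl → Spec_diagidx pathl (diagidx pathl)

-- ===== LEMMAS AND PROOFS =====

theorem tkey_inj {a b : Int × Int × Int} (h : tkey a = tkey b) : a = b := by
  obtain ⟨a1, a2, a3⟩ := a; obtain ⟨b1, b2, b3⟩ := b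
  simp [tkey, Prod.ext_iff] at h ⊢
  exact h

theorem foldl_pair {α β γ : Type} (f : β → α → β) (g : γ → α → γ) :
    ∀ (l : List α) (a : β) (b : γ),
      l.foldl (fun st p => (f st.1 p, g st.2 p)) (a, b) = (l.foldl f a, l.foldl g b)
  | [], _, _ => rfl
  | p :: t, a, b => foldl_pair f g t (f a p) (g b p)

theorem mem_insortTrip (v : List (Int × Int × Int)) (t a : Int × Int × Int) :
    a ∈ insortTrip v t ↔ a = t ∨ a ∈ v := by
  induction v with
  | nil => simp [insortTrip]
  | cons h r ih =>
      simp only [insortTrip]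
      split
      · simp
      · simp [ih, or_left_comm]

theorem insortTrip_perm (v : List (Int × Int × Int)) (t : Int × Int × Int) :
    (insortTrip v t).Perm (t :: v) := by
  induction v with
  | nil => exact List.Perm.refl _
  | cons h r ih =>
      simp only [insortTrip]
      split
      · exact List.Perm.refl _
      · exact (ih.cons h).trans (List.Perm.swap t h r)

theorem insortTrip_pairwise (v : List (Int × Int × Int)) (t : Int × Int × Int)
    (hv : v.Pairwise (fun a b => tkey a < tkey b))
    (hne : ∀ a ∈ v, tkey a ≠ tkey t) :
    (insortTrip v t).Pairwise (fun a b => tkey a < tkey b) := by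
  induction v with
  | nil => simp [insortTrip]
  | cons h r ih =>
      simp only [insortTrip]
      rw [List.pairwise_cons] at hv
      split
      · rename_i hlt
        refine List.pairwise_cons.mpr ⟨?_, List.pairwise_cons.mpr ⟨hv.1, hv.2⟩⟩
        intro x hx
        rcases List.mem_cons.mp hx with rfl | hx
        · exact hlt
        · exact lt_trans hlt (hv.1 x hx)
      · rename_i hnlt
        have hht : tkey h < tkey t :=
          lt_of_le_of_ne (not_lt.mp hnlt) (hne h (List.mem_cons_self))
        refine List.pairwise_cons.mpr ⟨?_, ih hv.2 (fun a ha => hne a (List.mem_cons_of_mem _ ha))⟩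
        intro x hx
        rcases (mem_insortTrip r t x).mp hx with rfl | hx
        · exact hht
        · exact hv.1 x hx

theorem foldl_insort_perm_pairwise :
    ∀ (bs acc : List (Int × Int × Int)),
      acc.Pairwise (fun a b => tkey a < tkey b) →
      (∀ a ∈ acc, ∀ b ∈ bs, tkey a ≠ tkey b) →
      bs.Pairwise (fun a b => tkey a ≠ tkey b) →
      (bs.foldl insortTrip acc).Perm (acc ++ bs) ∧
        (bs.foldl insortTrip acc).Pairwise (fun a b => tkey a < tkey b) := by
  intro bs
  induction bs with
  | nil => intro acc h _ _; refine ⟨?_, h⟩; simp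
  | cons b r ih =>
      intro acc hacc hcross hbs
      rw [List.pairwise_cons] at hbs
      have hacc' : (insortTrip acc b).Pairwise (fun a b => tkey a < tkey b) :=
        insortTrip_pairwise acc b hacc (fun a ha => hcross a ha b (List.mem_cons_self))
      have hcross' : ∀ a ∈ insortTrip acc b, ∀ x ∈ r, tkey a ≠ tkey x := by
        intro a ha x hx
        rcases (mem_insortTrip acc b a).mp ha with rfl | ha
        · exact hbs.1 x hx
        · exact hcross a ha x (List.mem_cons_of_mem _ hx)
      obtain ⟨hperm, hpw⟩ := ih (insortTrip acc b) hacc' hcross' hbs.2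
      refine ⟨?_, hpw⟩
      have h1 : (insortTrip acc b ++ r).Perm ((b :: acc) ++ r) :=
        (insortTrip_perm acc b).append_right r
      exact hperm.trans (h1.trans List.perm_middle.symm)

theorem foldl_insort_eq_sorted (bs : List (Int × Int × Int))
    (hbs : bs.Pairwise (fun a b => tkey a ≠ tkey b)) :
    bs.foldl insortTrip [] = PySem.List.sorted bs tkey := by
  obtain ⟨hperm, hpw⟩ :=
    foldl_insort_perm_pairwise bs [] (List.Pairwise.nil) (by simp) hbs
  exact (PySem.List.sorted_eq_of_perm_of_pairwise_lt bs _ tkey (by simpa using hperm) hpw).symm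

theorem set_add_of_mem {s : PySem.Set Int} {x : Int} (h : x ∈ s) : PySem.Set.add s x = s := by
  simp [PySem.Set.add, h]

theorem set_update_of_subset :
    ∀ (xs : List Int) (s : PySem.Set Int), (∀ x ∈ xs, x ∈ s) → PySem.Set.update s xs = s := by
  intro xs
  induction xs with
  | nil => intro s _; rfl
  | cons x t ih =>
      intro s h
      have : PySem.Set.update s (x :: t) = PySem.Set.update (PySem.Set.add s x) t := rfl
      rw [this, set_add_of_mem (h x (List.mem_cons_self))]
      exact ih s (fun y hy => h y (List.mem_cons_of_mem _ hy))

theorem getD_foldl_modify_gen {α : Type} (k : α → Int) (g : α → List (Int × Int × Int) → List (Int × Int × Int)) :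
    ∀ (l : List α) (d : PySem.Dict Int (List (Int × Int × Int))) (c : Int),
      (l.foldl (fun d p => d.modify (k p) [] (fun v => g p v)) d).getD c []
        = (l.filter (fun p => k p == c)).foldl (fun v p => g p v) (d.getD c []) := by
  intro l
  induction l with
  | nil => intro d c; rfl
  | cons p t ih =>
      intro d c
      rw [List.foldl_cons, ih, List.filter_cons]
      by_cases h : k p = c
      · simp [h]
      · have hbeq : (k p == c) = false := by simpa using h
        simp [hbeq, PySem.Dict.getD_modify, Ne.symm h]

theorem getD_sortfold :
    ∀ (ks : List Int) (d : PySem.Dict Int (List (Int × Int × Int))), ks.Nodup → ∀ (c : Int),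
      (ks.foldl (fun d k => d.modify k [] (fun v => PySem.List.sorted v tkey)) d).getD c []
        = if c ∈ ks then PySem.List.sorted (d.getD c []) tkey else d.getD c [] := by
  intro ks
  induction ks with
  | nil => intro d _ c; simp
  | cons k t ih =>
      intro d hnd c
      rw [List.nodup_cons] at hnd
      rw [List.foldl_cons, ih _ hnd.2]
      by_cases h : c = k
      · subst h
        simp [hnd.1]
      · simp [h, PySem.Dict.getD_modify]

theorem side_items (k : Int × (Int × Int) → Int) (l : List (Int × (Int × Int)))
    (hl : l.Pairwise (fun p q => p.1 < q.1)) :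
    (((l.foldl (fun d p => PySem.Dict.modify d (k p) [] (fun v => v ++ [(p.2.1, p.2.2, p.1)])) PySem.Dict.empty).keys.foldl
        (fun d kk => d.modify kk [] (fun v => PySem.List.sorted v tkey))
        (l.foldl (fun d p => PySem.Dict.modify d (k p) [] (fun v => v ++ [(p.2.1, p.2.2, p.1)])) PySem.Dict.empty)).items)
    = (l.foldl (fun d p => PySem.Dict.modify d (k p) [] (fun v => insortTrip v (p.2.1, p.2.2, p.1))) PySem.Dict.empty).items := by
  set dA := l.foldl (fun d p => PySem.Dict.modify d (k p) [] (fun v => v ++ [(p.2.1, p.2.2, p.1)])) PySem.Dict.empty with hdA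
  set dB := l.foldl (fun d p => PySem.Dict.modify d (k p) [] (fun v => insortTrip v (p.2.1, p.2.2, p.1))) PySem.Dict.empty with hdB
  set dA2 := dA.keys.foldl (fun d kk => d.modify kk [] (fun v => PySem.List.sorted v tkey)) dA with hdA2
  have hkA : dA.keys = PySem.Set.ofList (l.map k) := by
    rw [hdA, PySem.Dict.keys_foldl_modify_key l k [] (fun _ p v => v ++ [(p.2.1, p.2.2, p.1)]),
      PySem.Dict.keys_empty, PySem.Set.update_nil_left]
  have hkB : dB.keys = PySem.Set.ofList (l.map k) := by
    rw [hdB, PySem.Dict.keys_foldl_modify_key l k [] (fun _ p v => insortTrip v (p.2.1, p.2.2, p.1)),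
      PySem.Dict.keys_empty, PySem.Set.update_nil_left]
  have hndA : dA.keys.Nodup := by rw [hkA]; exact PySem.Set.nodup_ofList _
  have hndB : dB.keys.Nodup := by rw [hkB]; exact PySem.Set.nodup_ofList _
  have hkA2 : dA2.keys = dA.keys := by
    rw [hdA2, PySem.Dict.keys_foldl_modify_key dA.keys (fun x => x) []
      (fun _ kk v => PySem.List.sorted v tkey), List.map_id']
    exact set_update_of_subset dA.keys dA.keys (fun x hx => hx)
  have hndA2 : dA2.keys.Nodup := by rw [hkA2]; exact hndA
  rw [PySem.Dict.items_eq_map_keys dA2 hndA2 [], PySem.Dict.items_eq_map_keys dB hndB [],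
    hkA2, hkA, hkB]
  refine List.map_congr_left ?_
  intro c hc
  have hcmem : c ∈ dA.keys := by rw [hkA]; exact hc
  have hA2 : dA2.getD c [] = PySem.List.sorted (dA.getD c []) tkey := by
    rw [hdA2, getD_sortfold dA.keys dA hndA c, if_pos hcmem]
  have hAval : dA.getD c [] = ((l.filter (fun p => k p == c)).map (fun p => (p.2.1, p.2.2, p.1))) := by
    rw [hdA, getD_foldl_modify_gen k (fun p v => v ++ [(p.2.1, p.2.2, p.1)]) l PySem.Dict.empty c,
      PySem.Dict.getD_empty, PySem.List.foldl_append_singleton_eq_map]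
    simp
  have hBval : dB.getD c []
      = ((l.filter (fun p => k p == c)).map (fun p => (p.2.1, p.2.2, p.1))).foldl insortTrip [] := by
    rw [hdB, getD_foldl_modify_gen k (fun p v => insortTrip v (p.2.1, p.2.2, p.1)) l PySem.Dict.empty c,
      PySem.Dict.getD_empty, List.foldl_map]
  have hpw : ((l.filter (fun p => k p == c)).map (fun p => (p.2.1, p.2.2, p.1))).Pairwise
      (fun a b => tkey a ≠ tkey b) := by
    rw [List.pairwise_map]
    refine (hl.filter _).imp ?_
    intro p q hpq heq
    have h3 : p.1 = q.1 := congrArg (fun t => t.2.2) (tkey_inj heq)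
    exact absurd h3 (ne_of_lt hpq)
  have : dA2.getD c [] = dB.getD c [] := by
    rw [hA2, hAval, hBval, foldl_insort_eq_sorted _ hpw]
  simp [this]

-- ===== VERDICT (by name: the statement is the Claim_ definition above) =====
theorem diagidx_spec : Claim_equal_diagidx := by
  intro pathl _hdom
  show diagidx pathl = diagidx_alt pathl
  unfold diagidx diagidx_alt
  dsimp only
  rw [foldl_pair (fun (d : PySem.Dict Int (List (Int × Int × Int))) (p : Int × Int × Int) =>
          PySem.Dict.modify d (p.2.1 + p.2.2) [] (fun v => v ++ [(p.2.1, p.2.2, p.1)]))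
        (fun (d : PySem.Dict Int (List (Int × Int × Int))) (p : Int × Int × Int) =>
          PySem.Dict.modify d (p.2.1 - p.2.2) [] (fun v => v ++ [(p.2.1, p.2.2, p.1)])),
      foldl_pair (fun (d : PySem.Dict Int (List (Int × Int × Int))) (p : Int × Int × Int) =>
          PySem.Dict.modify d (p.2.1 + p.2.2) [] (fun v => insortTrip v (p.2.1, p.2.2, p.1)))
        (fun (d : PySem.Dict Int (List (Int × Int × Int))) (p : Int × Int × Int) =>
          PySem.Dict.modify d (p.2.1 - p.2.2) [] (fun v => insortTrip v (p.2.1, p.2.2, p.1)))]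
  have hp := PySem.List.pairwise_lt_enumerate pathl 0
  exact Prod.ext
    (side_items (fun p => p.2.1 + p.2.2) _ hp)
    (side_items (fun p => p.2.1 - p.2.2) _ hp)
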